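-- pv_equiv track=rewrite | github.com/saveriogzz/CS_Curriculum | ALGS200x_Algorithmic_Design_and_Techniques/4.Divide_and_Conquer/PC4-5_lottery.py | lottery_sort
-- ===== SOURCE A (Python) =====
-- def lottery_sort(segments, bets):
--
--     segments = [(segments[2*i], segments[2*i + 1])
--                         for i in range(len(segments) // 2)]
--
--     s_open = [i[0] for i in segments]
--     s_open.sort()
--     s_close = [i[1] for i in segments]
--     s_close.sort()
--
--     bets = sorted([bet for bet in bets])
--
--     res = []
--     count = 0
--     o = 0
--     c = 0
--     size = len(segments)
--     for bet in bets:
--         while o < size and s_open[o] <= bet: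
--             o += 1
--             count += 1
--         while c < size and s_close[c] < bet:
--             c += 1
--             count -= 1
--         res.append(count)
--
--     return sum(res)
-- ===== SOURCE B (Python) =====
-- def lottery_sort(segments, bets):
--     pairs = [(segments[2*i], segments[2*i + 1]) for i in range(len(segments) // 2)]
--     total = 0
--     for bet in bets:
--         for a, b in pairs:
--             total += (a <= bet) - (b < bet)
--     return total
-- ===== Notes on version B (the rewrite author's own statement) =====
-- stated objective: simpler
-- what changed: Replaces A's three sorts, stateful two-counter sweep over sorted bets and per-bet result list by a direct double loop that adds (a <= bet) - (b < bet) for every segment and bet; this is exactly the per-bet count A's sweep accumulates, so the totals agree (B is simpler but asymptotically slower on large inputs).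
import Mathlib
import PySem

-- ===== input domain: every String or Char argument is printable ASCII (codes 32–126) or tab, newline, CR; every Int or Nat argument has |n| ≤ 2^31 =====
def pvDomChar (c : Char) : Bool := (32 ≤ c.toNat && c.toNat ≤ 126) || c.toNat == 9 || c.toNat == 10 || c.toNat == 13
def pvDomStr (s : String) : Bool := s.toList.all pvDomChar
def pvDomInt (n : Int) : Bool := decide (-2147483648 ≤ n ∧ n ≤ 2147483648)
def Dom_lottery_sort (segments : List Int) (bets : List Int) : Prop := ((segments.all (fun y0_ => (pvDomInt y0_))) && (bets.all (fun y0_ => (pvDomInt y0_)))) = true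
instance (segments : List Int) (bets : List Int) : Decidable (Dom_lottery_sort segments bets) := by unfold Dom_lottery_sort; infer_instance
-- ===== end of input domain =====

-- B replaces A's three sorts and stateful two-counter sweep by a direct double loop adding
-- (a <= bet) - (b < bet) per segment per bet: simpler, no sorting, same exact result.

-- ===== PORT A =====
-- while o < size and s_open[o] <= bet: o += 1; count += 1
def lsWhileOpen (sopen : List Int) (bet : Int) (o : Nat) (count : Int) : Nat × Int :=
  if h : o < sopen.length ∧ sopen.getD o 0 ≤ bet then
    lsWhileOpen sopen bet (o + 1) (count + 1)
  else (o, count)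
termination_by sopen.length - o
decreasing_by omega

-- while c < size and s_close[c] < bet: c += 1; count -= 1
def lsWhileClose (sclose : List Int) (bet : Int) (c : Nat) (count : Int) : Nat × Int :=
  if h : c < sclose.length ∧ sclose.getD c 0 < bet then
    lsWhileClose sclose bet (c + 1) (count - 1)
  else (c, count)
termination_by sclose.length - c
decreasing_by omega

-- loop body for one bet; state = (res, count, o, c)
def lsStep (sopen sclose : List Int) (st : List Int × Int × Nat × Nat) (bet : Int) :
    List Int × Int × Nat × Nat :=
  let (o', count') := lsWhileOpen sopen bet st.2.2.1 st.2.1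
  let (c', count'') := lsWhileClose sclose bet st.2.2.2 count'
  (st.1 ++ [count''], count'', o', c')

def lottery_sort (segments : List Int) (bets : List Int) : Int :=
  let pairs := (List.range (segments.length / 2)).map
      (fun i => (segments.getD (2 * i) 0, segments.getD (2 * i + 1) 0))
  let sopen := PySem.List.sorted (pairs.map (fun i => i.1)) (fun x => x) false
  let sclose := PySem.List.sorted (pairs.map (fun i => i.2)) (fun x => x) false
  let bets' := PySem.List.sorted bets (fun x => x) false
  (bets'.foldl (lsStep sopen sclose) ([], 0, 0, 0)).1.sum

-- ===== PORT B =====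
def lottery_sort_alt (segments : List Int) (bets : List Int) : Int :=
  let pairs := (List.range (segments.length / 2)).map
      (fun i => (segments.getD (2 * i) 0, segments.getD (2 * i + 1) 0))
  bets.foldl (fun total bet =>
    pairs.foldl (fun t ab =>
      t + ((if ab.1 ≤ bet then (1 : Int) else 0) - (if ab.2 < bet then (1 : Int) else 0))) total) 0

-- ===== PRECONDITION & SPEC =====
def Spec_lottery_sort (segments : List Int) (bets : List Int) (out : Int) : Prop := out = lottery_sort_alt segments bets
instance (segments : List Int) (bets : List Int) (out : Int) : Decidable (Spec_lottery_sort segments bets out) := by unfold Spec_lottery_sort; infer_instance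

-- ===== CLAIM (what is proved, stated in full; the proofs are below) =====
def Claim_equal_lottery_sort : Prop := ∀ (segments : List Int) (bets : List Int), Dom_lottery_sort segments bets → Spec_lottery_sort segments bets (lottery_sort segments bets)

-- ===== LEMMAS AND PROOFS =====

-- per-bet value both programs compute: #(opens <= bet) - #(closes < bet)
def lsF (opens closes : List Int) (bet : Int) : Int :=
  ((opens.countP (fun x => decide (x ≤ bet)) : Nat) : Int)
    - ((closes.countP (fun x => decide (x < bet)) : Nat) : Int)

-- a monotone-downward predicate failing at the minimum fails everywhere
theorem ls_countP_zero (p : Int → Bool) (hmono : ∀ x y : Int, x ≤ y → p y = true → p x = true)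
    (a : Int) (t : List Int) (ha : p a = false) (hle : ∀ x ∈ t, a ≤ x) : t.countP p = 0 := by
  rw [List.countP_eq_zero]
  intro x hx hpx
  have := hmono a x (hle x hx) hpx
  simp [ha] at this

-- in a sorted list, positions satisfying a downward-closed predicate form the prefix of length countP
theorem ls_getD_iff (p : Int → Bool) (hmono : ∀ x y : Int, x ≤ y → p y = true → p x = true)
    (l : List Int) (hs : l.Pairwise (· ≤ ·)) (j : Nat) (hj : j < l.length) :
    p (l.getD j 0) = true ↔ j < l.countP p := by
  induction l generalizing j with
  | nil => simp at hj
  | cons a t ih =>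
    rw [List.pairwise_cons] at hs
    obtain ⟨hat, ht⟩ := hs
    cases j with
    | zero =>
      simp only [List.getD_cons_zero, List.countP_cons]
      constructor
      · intro hpa; simp [hpa]
      · intro hlt
        by_contra hpa
        have hz := ls_countP_zero p hmono a t (Bool.eq_false_iff.mpr hpa) hat
        rw [hz] at hlt
        simp [Bool.eq_false_iff.mpr hpa] at hlt
    | succ j =>
      simp only [List.getD_cons_succ, List.countP_cons]
      simp only [List.length_cons, Nat.succ_lt_succ_iff] at hj
      rw [ih ht j hj]
      by_cases hpa : p a = true
      · simp [hpa]
      · have hz := ls_countP_zero p hmono a t (Bool.eq_false_iff.mpr hpa) hat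
        have hzt : t.countP p = 0 := hz
        constructor
        · intro h; omega
        · intro h
          simp [Bool.eq_false_iff.mpr hpa, hzt] at h

theorem lsWhileOpen_eq (bet : Int) (l : List Int) (hs : l.Pairwise (· ≤ ·)) :
    ∀ (n o : Nat) (count : Int),
      l.countP (fun x => decide (x ≤ bet)) ≤ o + n →
      o ≤ l.countP (fun x => decide (x ≤ bet)) →
      lsWhileOpen l bet o count =
        (l.countP (fun x => decide (x ≤ bet)),
         count + ((l.countP (fun x => decide (x ≤ bet)) : Int) - o)) := by
  have hmono : ∀ x y : Int, x ≤ y → (decide (y ≤ bet)) = true → (decide (x ≤ bet)) = true := by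
    intro x y hxy h; simp at h ⊢; omega
  intro n
  induction n with
  | zero =>
    intro o count h1 h2
    have ho : o = l.countP (fun x => decide (x ≤ bet)) := by omega
    rw [lsWhileOpen]
    rw [dif_neg]
    · subst ho; norm_num
    · rintro ⟨hlen, hle⟩
      have := (ls_getD_iff (fun x => decide (x ≤ bet)) hmono l hs o hlen).mp (by simpa using hle)
      omega
  | succ n ih =>
    intro o count h1 h2
    by_cases hlt : o < l.countP (fun x => decide (x ≤ bet))
    · have hlen : o < l.length := lt_of_lt_of_le hlt l.countP_le_length
      have hle : l.getD o 0 ≤ bet := by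
        have := (ls_getD_iff (fun x => decide (x ≤ bet)) hmono l hs o hlen).mpr hlt
        simpa using this
      rw [lsWhileOpen, dif_pos ⟨hlen, hle⟩, ih (o + 1) (count + 1) (by omega) (by omega)]
      congr 1
      push_cast; ring
    · have ho : o = l.countP (fun x => decide (x ≤ bet)) := by omega
      rw [lsWhileOpen]
      rw [dif_neg]
      · subst ho; norm_num
      · rintro ⟨hlen, hle⟩
        have := (ls_getD_iff (fun x => decide (x ≤ bet)) hmono l hs o hlen).mp (by simpa using hle)
        omega

theorem lsWhileClose_eq (bet : Int) (l : List Int) (hs : l.Pairwise (· ≤ ·)) :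
    ∀ (n c : Nat) (count : Int),
      l.countP (fun x => decide (x < bet)) ≤ c + n →
      c ≤ l.countP (fun x => decide (x < bet)) →
      lsWhileClose l bet c count =
        (l.countP (fun x => decide (x < bet)),
         count - ((l.countP (fun x => decide (x < bet)) : Int) - c)) := by
  have hmono : ∀ x y : Int, x ≤ y → (decide (y < bet)) = true → (decide (x < bet)) = true := by
    intro x y hxy h; simp at h ⊢; omega
  intro n
  induction n with
  | zero =>
    intro c count h1 h2
    have hc : c = l.countP (fun x => decide (x < bet)) := by omega
    rw [lsWhileClose]
    rw [dif_neg]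
    · subst hc; norm_num
    · rintro ⟨hlen, hle⟩
      have := (ls_getD_iff (fun x => decide (x < bet)) hmono l hs c hlen).mp (by simpa using hle)
      omega
  | succ n ih =>
    intro c count h1 h2
    by_cases hlt : c < l.countP (fun x => decide (x < bet))
    · have hlen : c < l.length := lt_of_lt_of_le hlt l.countP_le_length
      have hle : l.getD c 0 < bet := by
        have := (ls_getD_iff (fun x => decide (x < bet)) hmono l hs c hlen).mpr hlt
        simpa using this
      rw [lsWhileClose, dif_pos ⟨hlen, hle⟩, ih (c + 1) (count - 1) (by omega) (by omega)]
      congr 1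
      push_cast; ring
    · have hc : c = l.countP (fun x => decide (x < bet)) := by omega
      rw [lsWhileClose]
      rw [dif_neg]
      · subst hc; norm_num
      · rintro ⟨hlen, hle⟩
        have := (ls_getD_iff (fun x => decide (x < bet)) hmono l hs c hlen).mp (by simpa using hle)
        omega

theorem ls_loop (sopen sclose : List Int) (hso : sopen.Pairwise (· ≤ ·)) (hsc : sclose.Pairwise (· ≤ ·)) :
    ∀ (r : List Int), r.Pairwise (· ≤ ·) →
      ∀ (res : List Int) (o c : Nat) (count : Int),
      (∀ bet ∈ r, o ≤ sopen.countP (fun x => decide (x ≤ bet))) →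
      (∀ bet ∈ r, c ≤ sclose.countP (fun x => decide (x < bet))) →
      count = (o : Int) - (c : Int) →
      (r.foldl (lsStep sopen sclose) (res, count, o, c)).1 =
        res ++ r.map (fun bet => lsF sopen sclose bet) := by
  intro r
  induction r with
  | nil => intro _ res o c count _ _ _; simp
  | cons bet r' ih =>
    intro hr res o c count ho hc hcount
    rw [List.pairwise_cons] at hr
    obtain ⟨hb, hr'⟩ := hr
    have hko : o ≤ sopen.countP (fun x => decide (x ≤ bet)) := ho bet (by simp)
    have hkc : c ≤ sclose.countP (fun x => decide (x < bet)) := hc bet (by simp)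
    have h1 := lsWhileOpen_eq bet sopen hso (sopen.countP (fun x => decide (x ≤ bet))) o count
      (by omega) hko
    have h2 := lsWhileClose_eq bet sclose hsc (sclose.countP (fun x => decide (x < bet))) c
      (count + ((sopen.countP (fun x => decide (x ≤ bet)) : Int) - o)) (by omega) hkc
    have hstep : lsStep sopen sclose (res, count, o, c) bet =
        (res ++ [lsF sopen sclose bet], lsF sopen sclose bet,
         sopen.countP (fun x => decide (x ≤ bet)), sclose.countP (fun x => decide (x < bet))) := by
      simp only [lsStep, h1, h2]
      have : count + ((sopen.countP (fun x => decide (x ≤ bet)) : Int) - o)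
          - ((sclose.countP (fun x => decide (x < bet)) : Int) - c) = lsF sopen sclose bet := by
        simp only [lsF]; omega
      rw [this]
    have ho' : ∀ bet' ∈ r', (sopen.countP (fun x => decide (x ≤ bet)))
        ≤ sopen.countP (fun x => decide (x ≤ bet')) := by
      intro bet' hbet'
      apply List.countP_mono_left
      intro x _ hx
      simp only [decide_eq_true_eq] at hx ⊢
      exact le_trans hx (hb bet' hbet')
    have hc' : ∀ bet' ∈ r', (sclose.countP (fun x => decide (x < bet)))
        ≤ sclose.countP (fun x => decide (x < bet')) := by
      intro bet' hbet'
      apply List.countP_mono_left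
      intro x _ hx
      simp only [decide_eq_true_eq] at hx ⊢
      exact lt_of_lt_of_le hx (hb bet' hbet')
    simp only [List.foldl_cons, hstep]
    rw [ih hr' (res ++ [lsF sopen sclose bet])
      (sopen.countP (fun x => decide (x ≤ bet))) (sclose.countP (fun x => decide (x < bet)))
      (lsF sopen sclose bet) ho' hc' (by simp only [lsF])]
    simp

theorem ls_A_sum (segments bets : List Int) :
    lottery_sort segments bets =
      ((PySem.List.sorted bets (fun x => x) false).map
        (fun bet => lsF
          ((((List.range (segments.length / 2)).map
              (fun i => (segments.getD (2 * i) 0, segments.getD (2 * i + 1) 0))).map (fun i => i.1)))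
          ((((List.range (segments.length / 2)).map
              (fun i => (segments.getD (2 * i) 0, segments.getD (2 * i + 1) 0))).map (fun i => i.2)))
          bet)).sum := by
  have hcore : ∀ (opens closes bs : List Int),
      ((PySem.List.sorted bs (fun x => x) false).foldl
        (lsStep (PySem.List.sorted opens (fun x => x) false)
                (PySem.List.sorted closes (fun x => x) false)) ([], 0, 0, 0)).1.sum
      = ((PySem.List.sorted bs (fun x => x) false).map (fun bet => lsF opens closes bet)).sum := by
    intro opens closes bs
    rw [ls_loop _ _ (PySem.List.sorted_pairwise _ _) (PySem.List.sorted_pairwise _ _) _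
      (PySem.List.sorted_pairwise _ _) [] 0 0 0
      (fun _ _ => Nat.zero_le _) (fun _ _ => Nat.zero_le _) (by norm_num)]
    rw [List.nil_append]
    congr 1
    apply List.map_congr_left
    intro bet _
    simp only [lsF]
    rw [List.Perm.countP_eq _ (PySem.List.sorted_perm _ _ _), List.Perm.countP_eq _ (PySem.List.sorted_perm _ _ _)]
  simp only [lottery_sort]
  exact hcore _ _ _

theorem ls_pairs_sum (pairs : List (Int × Int)) (bet : Int) :
    (pairs.map (fun ab => (if ab.1 ≤ bet then (1 : Int) else 0) - (if ab.2 < bet then (1 : Int) else 0))).sum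
      = lsF (pairs.map (fun i => i.1)) (pairs.map (fun i => i.2)) bet := by
  induction pairs with
  | nil => simp [lsF]
  | cons ab t ih =>
    simp only [List.map_cons, List.sum_cons, ih, lsF, List.countP_cons]
    by_cases h1 : ab.1 ≤ bet <;> by_cases h2 : ab.2 < bet <;>
      simp [h1, h2] <;> omega

theorem ls_B_sum (segments bets : List Int) :
    lottery_sort_alt segments bets =
      (bets.map
        (fun bet => lsF
          ((((List.range (segments.length / 2)).map
              (fun i => (segments.getD (2 * i) 0, segments.getD (2 * i + 1) 0))).map (fun i => i.1)))
          ((((List.range (segments.length / 2)).map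
              (fun i => (segments.getD (2 * i) 0, segments.getD (2 * i + 1) 0))).map (fun i => i.2)))
          bet)).sum := by
  simp only [lottery_sort_alt]
  have h1 : ∀ bet ∈ bets, ∀ total : Int,
      ((List.range (segments.length / 2)).map
          (fun i => (segments.getD (2 * i) 0, segments.getD (2 * i + 1) 0))).foldl
        (fun t ab => t + ((if ab.1 ≤ bet then (1 : Int) else 0) - (if ab.2 < bet then (1 : Int) else 0))) total
      = total + lsF
          ((((List.range (segments.length / 2)).map
              (fun i => (segments.getD (2 * i) 0, segments.getD (2 * i + 1) 0))).map (fun i => i.1)))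
          ((((List.range (segments.length / 2)).map
              (fun i => (segments.getD (2 * i) 0, segments.getD (2 * i + 1) 0))).map (fun i => i.2)))
          bet := by
    intro bet _ total
    have h2 := PySem.List.foldl_add
      ((List.range (segments.length / 2)).map
        (fun i => (segments.getD (2 * i) 0, segments.getD (2 * i + 1) 0)))
      (fun ab => (if ab.1 ≤ bet then (1 : Int) else 0) - (if ab.2 < bet then (1 : Int) else 0)) total
    rw [h2, ls_pairs_sum]
  rw [PySem.List.foldl_congr_mem' _ _ _ _ h1]
  have h3 := PySem.List.foldl_add bets
    (fun bet => lsF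
      ((((List.range (segments.length / 2)).map
          (fun i => (segments.getD (2 * i) 0, segments.getD (2 * i + 1) 0))).map (fun i => i.1)))
      ((((List.range (segments.length / 2)).map
          (fun i => (segments.getD (2 * i) 0, segments.getD (2 * i + 1) 0))).map (fun i => i.2)))
      bet) 0
  rw [h3]
  simp

-- ===== VERDICT (by name: the statement is the Claim_ definition above) =====
theorem lottery_sort_spec : Claim_equal_lottery_sort := by
  intro segments bets _
  unfold Spec_lottery_sort
  rw [ls_A_sum, ls_B_sum]
  exact List.Perm.sum_eq (List.Perm.map _ (PySem.List.sorted_perm _ _ _))
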